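-- pv_equiv track=rewrite | github.com/TheArtbot/All-My-Projects | Python Code/PyCOdes/MathCode/RandomSumTo.py | targetFinder
-- ===== SOURCE A (Python) =====
-- def targetFinder(target,_numSet = []):
--
--     def Utility(l, target):
--         return target*l
--
--     def Hueristic(value, target):
--         return abs(target - value)
--
--     def SortedInsert(value, lst):
--         for i,q in enumerate(lst):
--             if(q[1] >= value[1]): return (True,i)
--         return (False,len(queue))
--
--     numSet = _numSet.copy()
--
--     reached = False
--     queue = [(0,0)]
--     visited = [[queue[0][0]]]
--     actions = [[]]
--
--     while len(queue) > 0: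
--         #breakpoint()
--         state = queue.pop(0)
--         current_visited = visited.pop(0)
--         current_actions = actions.pop(0)
--
--         #Checks if the current state is our target
--         if state[0] == target:
--             reached = True
--             return (reached,current_actions)
--
--         #Cycle through moves
--         for num in numSet:
--             # Add the value:
--             next_value = state[0] + num
--             #breakpoint()
--             if next_value not in current_visited:
--                 next_state = (next_value, Utility(len(current_visited),target) + Hueristic(next_value,target))
--                 pos = SortedInsert(next_state,queue)
--                 if pos[0]:
--                     queue.insert(pos[1],next_state)
--                     visited.insert(pos[1],current_visited + [next_value])
--                     actions.insert(pos[1],current_actions + [num])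
--                 else:
--                     queue.append(next_state)
--                     visited.append(current_visited + [next_value])
--                     actions.append(current_actions + [num])
--
--             #Subtract a value:
--             next_value = state[0] - num
--             if next_value not in current_visited:
--                 next_state = (next_value, Utility(len(current_visited),target) + Hueristic(next_value,target))
--                 pos = SortedInsert(next_state,queue)
--                 if pos[0]:
--                     queue.insert(pos[1],next_state)
--                     visited.insert(pos[1],current_visited + [next_value])
--                     actions.insert(pos[1],current_actions + [-num])
--                 else:
--                     queue.append(next_state)
--                     visited.append(current_visited + [next_value])
--                     actions.append(current_actions + [-num])
--     return (False,[])
-- ===== SOURCE B (Python) =====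
-- def targetFinder(target, _numSet=[]):
--     # Selection-based priority queue: one unsorted list of (priority, counter, value, path, actions)
--     # records; enqueue is an O(1) append, dequeue is a single scan for the min (priority, -counter)
--     # entry followed by removing it. Counters are unique, so the scanned minimum is A's queue head.
--     nums = list(_numSet)
--     entries = [(0, 0, 0, [0], [])]
--     counter = 1
--     while entries:
--         best = entries[0]
--         for e in entries[1:]:
--             if e[0] < best[0] or (e[0] == best[0] and e[1] > best[1]):
--                 best = e
--         entries.remove(best)
--         p, c, value, path, acts = best
--         if value == target:
--             return (True, acts)
--         for num in nums:
--             for step in (num, -num):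
--                 nv = value + step
--                 if nv not in path:
--                     pr = target * len(path) + abs(target - nv)
--                     entries.append((pr, counter, nv, path + [nv], acts + [step]))
--                     counter += 1
--     return (False, [])
-- ===== Notes on version B (the rewrite author's own statement) =====
-- stated objective: alternative
-- what changed: A keeps three parallel lists sorted by priority, scanning for a position and inserting there on every enqueue and popping the head; B keeps one unsorted list of (priority, counter, value, path, actions) records, enqueues by appending and dequeues with a single min-scan keyed by (priority, -counter), which reproduces A's pop order (ties go to the newest entry) exactly.
import Mathlib
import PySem

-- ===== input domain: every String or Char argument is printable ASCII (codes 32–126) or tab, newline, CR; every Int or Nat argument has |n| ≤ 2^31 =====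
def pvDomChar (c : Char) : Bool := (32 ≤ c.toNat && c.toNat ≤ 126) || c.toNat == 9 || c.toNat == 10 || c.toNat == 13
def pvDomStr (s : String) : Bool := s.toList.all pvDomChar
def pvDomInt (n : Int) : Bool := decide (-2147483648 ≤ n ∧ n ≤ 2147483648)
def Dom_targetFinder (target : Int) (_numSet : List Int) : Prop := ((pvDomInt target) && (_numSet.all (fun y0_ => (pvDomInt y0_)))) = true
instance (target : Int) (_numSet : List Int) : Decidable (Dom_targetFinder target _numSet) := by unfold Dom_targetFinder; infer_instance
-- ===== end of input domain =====

-- B replaces A's sorted-position insertion into three parallel lists by a single unsorted list of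
-- (priority, counter, value, path, actions) records: enqueue appends, dequeue is one min-scan keyed
-- by (priority, -counter), which reproduces A's pop order (ties to the newest entry) exactly.
-- A's while-loop diverges on unreachable targets (it never raises); both ports carry the SAME fuel
-- bound 10^9, so the equality proved below covers every input, fuel-exhaustion included.

-- ===== PORT A =====
-- SortedInsert: returns some i (Python (True,i)) for the first index with priority ≥ p, else none
-- (Python (False,len(queue)), which A handles by appending).
def findPosA (p : Int) : List (Int × Int) → Option Nat
  | [] => none
  | q :: rest => if q.2 ≥ p then some 0 else (findPosA p rest).map (· + 1)

-- one of A's two duplicated child blocks (add with delta = num, subtract with delta = -num)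
def addChildA (target : Int) (sv : Int) (cv : List Int) (ca : List Int)
    (st : List (Int × Int) × List (List Int) × List (List Int)) (delta : Int) :
    List (Int × Int) × List (List Int) × List (List Int) :=
  let nv := sv + delta
  if cv.contains nv then st
  else
    let pr := target * (cv.length : Int) + |target - nv|
    match findPosA pr st.1 with
    | some i => (st.1.insertIdx i (nv, pr), st.2.1.insertIdx i (cv ++ [nv]), st.2.2.insertIdx i (ca ++ [delta]))
    | none => (st.1 ++ [(nv, pr)], st.2.1 ++ [cv ++ [nv]], st.2.2 ++ [ca ++ [delta]])

def loopA (target : Int) (numSet : List Int) :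
    Nat → List (Int × Int) → List (List Int) → List (List Int) → Bool × List Int
  | 0, _, _, _ => (false, [])
  | _ + 1, [], _, _ => (false, [])
  | fuel + 1, s :: q, cv :: v, ca :: a =>
    if s.1 = target then (true, ca)
    else
      let st := numSet.foldl
        (fun st num => addChildA target s.1 cv ca (addChildA target s.1 cv ca st num) (-num))
        (q, v, a)
      loopA target numSet fuel st.1 st.2.1 st.2.2
  | _ + 1, _ :: _, _, _ => (false, [])   -- unreachable: the three lists stay in sync

def targetFinder (target : Int) (_numSet : List Int) : Bool × List Int :=
  loopA target _numSet 1000000000 [(0, 0)] [[0]] [[]]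

-- ===== PORT B =====
-- an entry is (priority, counter, value, path, actions)
def findBestB (best : Int × Int × Int × List Int × List Int) :
    List (Int × Int × Int × List Int × List Int) → Int × Int × Int × List Int × List Int
  | [] => best
  | e :: es =>
    if e.1 < best.1 ∨ (e.1 = best.1 ∧ e.2.1 > best.2.1) then findBestB e es else findBestB best es

def childB (target : Int) (value : Int) (path : List Int) (acts : List Int)
    (st : List (Int × Int × Int × List Int × List Int) × Int) (step : Int) :
    List (Int × Int × Int × List Int × List Int) × Int :=
  let nv := value + step
  if path.contains nv then st
  else
    let pr := target * (path.length : Int) + |target - nv|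
    (st.1 ++ [(pr, st.2, nv, path ++ [nv], acts ++ [step])], st.2 + 1)

def loopB (target : Int) (nums : List Int) :
    Nat → List (Int × Int × Int × List Int × List Int) → Int → Bool × List Int
  | 0, _, _ => (false, [])
  | _ + 1, [], _ => (false, [])
  | fuel + 1, e :: es, counter =>
    let best := findBestB e es
    let rest := (e :: es).erase best
    if best.2.2.1 = target then (true, best.2.2.2.2)
    else
      let st := nums.foldl
        (fun st num =>
          childB target best.2.2.1 best.2.2.2.1 best.2.2.2.2
            (childB target best.2.2.1 best.2.2.2.1 best.2.2.2.2 st num) (-num))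
        (rest, counter)
      loopB target nums fuel st.1 st.2

def targetFinder_alt (target : Int) (_numSet : List Int) : Bool × List Int :=
  loopB target _numSet 1000000000 [(0, 0, 0, [0], [])] 1

-- ===== PRECONDITION & SPEC =====
def Spec_targetFinder (target : Int) (_numSet : List Int) (out : Bool × List Int) : Prop := out = targetFinder_alt target _numSet
instance (target : Int) (_numSet : List Int) (out : Bool × List Int) : Decidable (Spec_targetFinder target _numSet out) := by unfold Spec_targetFinder; infer_instance

-- ===== CLAIM (what is proved, stated in full; the proofs are below) =====
def Claim_equal_targetFinder : Prop := ∀ (target : Int) (_numSet : List Int), Dom_targetFinder target _numSet → Spec_targetFinder target _numSet (targetFinder target _numSet)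

-- ===== LEMMAS AND PROOFS =====

-- A's sorted queue, reconstructed from B's entries in insertion order:
-- rinsert is exactly A's SortedInsert position rule, lifted to whole entries.
def rinsert (z : Int × Int × Int × List Int × List Int) :
    List (Int × Int × Int × List Int × List Int) → List (Int × Int × Int × List Int × List Int)
  | [] => [z]
  | e :: es => if e.1 ≥ z.1 then z :: e :: es else e :: rinsert z es

def rebuild (l : List (Int × Int × Int × List Int × List Int)) :
    List (Int × Int × Int × List Int × List Int) :=
  l.foldl (fun acc z => rinsert z acc) []

theorem rebuild_append (l : List (Int × Int × Int × List Int × List Int)) (z) :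
    rebuild (l ++ [z]) = rinsert z (rebuild l) := by
  simp [rebuild, List.foldl_append]

-- the A-side insert (scan for position, then insertIdx / append in each parallel list)
-- equals mapping any projection over rinsert
theorem insA_eq_rinsert {α : Type} (g : (Int × Int × Int × List Int × List Int) → α)
    (z : Int × Int × Int × List Int × List Int)
    (l : List (Int × Int × Int × List Int × List Int)) :
    (match findPosA z.1 (l.map (fun e => (e.2.2.1, e.1))) with
     | some i => (l.map g).insertIdx i (g z)
     | none => l.map g ++ [g z]) = (rinsert z l).map g := by
  induction l with
  | nil => simp [findPosA, rinsert]
  | cons e es ih =>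
    by_cases h : e.1 ≥ z.1
    · simp [findPosA, rinsert, h]
    · simp only [findPosA, rinsert, List.map_cons, h]
      cases hfp : findPosA z.1 (es.map (fun e => (e.2.2.1, e.1))) with
      | none => simpa [hfp] using congrArg (g e :: ·) (by simpa [hfp] using ih)
      | some i => simpa [hfp, List.insertIdx] using congrArg (g e :: ·) (by simpa [hfp] using ih)

theorem findBestB_mem (e : Int × Int × Int × List Int × List Int)
    (es : List (Int × Int × Int × List Int × List Int)) :
    findBestB e es = e ∨ findBestB e es ∈ es := by
  induction es generalizing e with
  | nil => simp [findBestB]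
  | cons f fs ih =>
    simp only [findBestB]
    split
    · rcases ih f with h | h
      · right; simp [h]
      · right; simp [h]
    · rcases ih e with h | h
      · left; exact h
      · right; simp [h]

theorem findBestB_append (e : Int × Int × Int × List Int × List Int)
    (es : List (Int × Int × Int × List Int × List Int))
    (z : Int × Int × Int × List Int × List Int) :
    findBestB e (es ++ [z]) =
      if z.1 < (findBestB e es).1 ∨ (z.1 = (findBestB e es).1 ∧ z.2.1 > (findBestB e es).2.1)
      then z else findBestB e es := by
  induction es generalizing e with
  | nil => simp [findBestB]
  | cons f fs ih =>
    simp only [List.cons_append, findBestB]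
    split
    · exact ih f
    · exact ih e

theorem pop_rebuild (l : List (Int × Int × Int × List Int × List Int))
    (hne : l ≠ [])
    (hinc : l.Pairwise (fun x y => x.2.1 < y.2.1)) :
    rebuild l = findBestB (l.headI) (l.tail) :: rebuild (l.erase (findBestB (l.headI) (l.tail))) := by
  induction l using List.reverseRecOn with
  | nil => exact absurd rfl hne
  | append_singleton init z ih =>
    cases init with
    | nil => simp [rebuild, rinsert, findBestB]
    | cons e es =>
      have hinc' : (e :: es).Pairwise (fun x y => x.2.1 < y.2.1) :=
        hinc.sublist (by simp)
      have ih' := ih (by simp) hinc'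
      set b := findBestB e es with hb
      have hbmem : b ∈ e :: es := by
        rcases findBestB_mem e es with h | h
        · simp [hb, h]
        · simp [hb, h]
      have hc : b.2.1 < z.2.1 := by
        rw [List.pairwise_append] at hinc
        exact hinc.2.2 b hbmem z (by simp)
      have hzne : z ∉ e :: es := by
        intro hz
        rw [List.pairwise_append] at hinc
        exact absurd (hinc.2.2 z hz z (by simp)) (lt_irrefl _)
      have happ : findBestB (((e :: es) ++ [z]).headI) (((e :: es) ++ [z]).tail)
          = if z.1 < b.1 ∨ (z.1 = b.1 ∧ z.2.1 > b.2.1) then z else b := by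
        simpa using findBestB_append e es z
      have hcond : (z.1 < b.1 ∨ (z.1 = b.1 ∧ z.2.1 > b.2.1)) ↔ z.1 ≤ b.1 := by
        constructor
        · rintro (h | ⟨h, _⟩) <;> omega
        · intro h
          rcases lt_or_eq_of_le h with h' | h'
          · left; exact h'
          · right; exact ⟨h', hc⟩
      by_cases hle : z.1 ≤ b.1
      · have hbest : findBestB (((e :: es) ++ [z]).headI) (((e :: es) ++ [z]).tail) = z := by
          rw [happ, if_pos (hcond.mpr hle)]
        rw [hbest, rebuild_append, ih']
        have herase : ((e :: es) ++ [z]).erase z = e :: es := by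
          rw [List.erase_append_right _ hzne]
          simp
        rw [herase, ih']
        show rinsert z (b :: rebuild ((e :: es).erase b)) = _
        rw [rinsert, if_pos (by omega : b.1 ≥ z.1)]
        simp [hb]
      · have hbest : findBestB (((e :: es) ++ [z]).headI) (((e :: es) ++ [z]).tail) = b := by
          rw [happ, if_neg (fun h => hle (hcond.mp h))]
        rw [hbest, rebuild_append, ih']
        have herase : ((e :: es) ++ [z]).erase b = (e :: es).erase b ++ [z] :=
          List.erase_append_left _ hbmem
        rw [herase, rebuild_append]
        show rinsert z (b :: rebuild ((e :: es).erase b)) =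
          findBestB e es :: rinsert z (rebuild ((e :: es).erase (findBestB e es)))
        simp only [rinsert, ← hb]
        rw [if_neg (by omega : ¬ b.1 ≥ z.1)]

theorem step_childB (target sv : Int) (path acts : List Int) (delta : Int)
    (r : List (Int × Int × Int × List Int × List Int)) (c : Int)
    (hinc : r.Pairwise (fun x y => x.2.1 < y.2.1)) (hub : ∀ x ∈ r, x.2.1 < c) :
    addChildA target sv path acts
      ((rebuild r).map (fun e => (e.2.2.1, e.1)), (rebuild r).map (fun e => e.2.2.2.1),
       (rebuild r).map (fun e => e.2.2.2.2)) delta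
      = ((rebuild (childB target sv path acts (r, c) delta).1).map (fun e => (e.2.2.1, e.1)),
         (rebuild (childB target sv path acts (r, c) delta).1).map (fun e => e.2.2.2.1),
         (rebuild (childB target sv path acts (r, c) delta).1).map (fun e => e.2.2.2.2))
    ∧ (childB target sv path acts (r, c) delta).1.Pairwise (fun x y => x.2.1 < y.2.1)
    ∧ ∀ x ∈ (childB target sv path acts (r, c) delta).1,
        x.2.1 < (childB target sv path acts (r, c) delta).2 := by
  by_cases hmem : sv + delta ∈ path
  · refine ⟨?_, ?_, ?_⟩
    · simp [addChildA, childB, hmem]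
    · simpa [childB, hmem] using hinc
    · simpa [childB, hmem] using hub
  · have hch : childB target sv path acts (r, c) delta =
        (r ++ [(target * (path.length : Int) + |target - (sv + delta)|, c, sv + delta,
                path ++ [sv + delta], acts ++ [delta])], c + 1) := by
      simp [childB, hmem]
    set z : Int × Int × Int × List Int × List Int :=
      (target * (path.length : Int) + |target - (sv + delta)|, c, sv + delta,
       path ++ [sv + delta], acts ++ [delta]) with hz
    refine ⟨?_, ?_, ?_⟩
    · have h1 := insA_eq_rinsert (fun e => (e.2.2.1, e.1)) z (rebuild r)
      have h2 := insA_eq_rinsert (fun e => e.2.2.2.1) z (rebuild r)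
      have h3 := insA_eq_rinsert (fun e => e.2.2.2.2) z (rebuild r)
      rw [hch]
      simp only [rebuild_append]
      rw [← h1, ← h2, ← h3]
      simp only [addChildA]
      rw [if_neg (by simpa using hmem)]
      cases hfp : findPosA z.1 ((rebuild r).map (fun e => (e.2.2.1, e.1))) with
      | none => simp [hz]
      | some i => simp [hz]
    · rw [hch]
      refine List.pairwise_append.mpr ⟨hinc, by simp, ?_⟩
      intro x hx y hy
      simp only [List.mem_singleton] at hy
      subst hy
      exact hub x hx
    · rw [hch]
      intro x hx
      rcases List.mem_append.mp hx with h | h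
      · exact lt_trans (hub x h) (by omega)
      · simp only [List.mem_singleton] at h
        subst h
        simp [hz]

theorem fold_children (target sv : Int) (path acts : List Int) (nums : List Int) :
    ∀ (r : List (Int × Int × Int × List Int × List Int)) (c : Int),
    r.Pairwise (fun x y => x.2.1 < y.2.1) → (∀ x ∈ r, x.2.1 < c) →
    (nums.foldl
        (fun st num => addChildA target sv path acts (addChildA target sv path acts st num) (-num))
        ((rebuild r).map (fun e => (e.2.2.1, e.1)), (rebuild r).map (fun e => e.2.2.2.1),
         (rebuild r).map (fun e => e.2.2.2.2))
      = ((rebuild (nums.foldl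
            (fun st num => childB target sv path acts (childB target sv path acts st num) (-num))
            (r, c)).1).map (fun e => (e.2.2.1, e.1)),
         (rebuild (nums.foldl
            (fun st num => childB target sv path acts (childB target sv path acts st num) (-num))
            (r, c)).1).map (fun e => e.2.2.2.1),
         (rebuild (nums.foldl
            (fun st num => childB target sv path acts (childB target sv path acts st num) (-num))
            (r, c)).1).map (fun e => e.2.2.2.2)))
    ∧ (nums.foldl
        (fun st num => childB target sv path acts (childB target sv path acts st num) (-num))
        (r, c)).1.Pairwise (fun x y => x.2.1 < y.2.1)
    ∧ ∀ x ∈ (nums.foldl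
        (fun st num => childB target sv path acts (childB target sv path acts st num) (-num))
        (r, c)).1,
        x.2.1 < (nums.foldl
          (fun st num => childB target sv path acts (childB target sv path acts st num) (-num))
          (r, c)).2 := by
  induction nums with
  | nil => exact fun r c hinc hub => ⟨rfl, hinc, hub⟩
  | cons n ns ih =>
    intro r c hinc hub
    have s1 := step_childB target sv path acts n r c hinc hub
    rcases hst1 : childB target sv path acts (r, c) n with ⟨r1, c1⟩
    rw [hst1] at s1
    have s2 := step_childB target sv path acts (-n) r1 c1 s1.2.1 s1.2.2
    rcases hst2 : childB target sv path acts (r1, c1) (-n) with ⟨r2, c2⟩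
    rw [hst2] at s2
    have ihr := ih r2 c2 s2.2.1 s2.2.2
    simp only [List.foldl_cons]
    rw [s1.1, s2.1, hst1, hst2]
    exact ihr

theorem main_loop (target : Int) (nums : List Int) (fuel : Nat) :
    ∀ (entries : List (Int × Int × Int × List Int × List Int)) (counter : Int),
    entries.Pairwise (fun x y => x.2.1 < y.2.1) →
    (∀ x ∈ entries, x.2.1 < counter) →
    loopA target nums fuel
      ((rebuild entries).map (fun e => (e.2.2.1, e.1)))
      ((rebuild entries).map (fun e => e.2.2.2.1))
      ((rebuild entries).map (fun e => e.2.2.2.2))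
      = loopB target nums fuel entries counter := by
  induction fuel with
  | zero => intro entries counter _ _; simp [loopA, loopB]
  | succ fuel ih =>
    intro entries counter hinc hub
    cases entries with
    | nil => simp [rebuild, loopA, loopB]
    | cons e es =>
      have hpop := pop_rebuild (e :: es) (by simp) hinc
      simp only [List.headI_cons, List.tail_cons] at hpop
      rw [hpop]
      simp only [List.map_cons]
      show loopA target nums (fuel + 1)
          (((findBestB e es).2.2.1, (findBestB e es).1)
            :: ((rebuild ((e :: es).erase (findBestB e es))).map (fun e => (e.2.2.1, e.1))))
          _ _ = _
      simp only [loopA, loopB]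
      by_cases ht : (findBestB e es).2.2.1 = target
      · simp [ht]
      · simp only [ht, if_false]
        have hincr : ((e :: es).erase (findBestB e es)).Pairwise (fun x y => x.2.1 < y.2.1) :=
          hinc.sublist List.erase_sublist
        have hubr : ∀ x ∈ (e :: es).erase (findBestB e es), x.2.1 < counter :=
          fun x hx => hub x (List.mem_of_mem_erase hx)
        have hfold := fold_children target (findBestB e es).2.2.1 (findBestB e es).2.2.2.1
          (findBestB e es).2.2.2.2 nums ((e :: es).erase (findBestB e es)) counter hincr hubr
        rw [hfold.1]
        exact ih _ _ hfold.2.1 hfold.2.2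

-- ===== VERDICT (by name: the statement is the Claim_ definition above) =====
theorem targetFinder_spec : Claim_equal_targetFinder := by
  intro target numSet _
  unfold Spec_targetFinder targetFinder targetFinder_alt
  have := main_loop target numSet 1000000000 [(0, 0, 0, [0], [])] 1
    (by simp) (by intro x hx; simp at hx; simp [hx])
  simpa [rebuild, rinsert] using this
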